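-- pv_equiv track=rewrite | github.com/Roman67878/Romanus | dz8/stallone.py | stallone
-- ===== SOURCE A (Python) =====
-- def stallone(lst):
--     i = 0
--     el = lst[0]
--     s = len(lst)
--     while i < len(lst):
--         if el <= lst[i]:
--             el = lst[i]
--             i += 1
--         else:
--             del lst[i]
--             s -= 1
--     return lst
-- ===== SOURCE B (Python) =====
-- def stallone(lst):
--     out = []
--     mx = None
--     for x in lst:
--         if mx is None or x >= mx:
--             out.append(x)
--             mx = x
--     return out
-- ===== Notes on version B (the rewrite author's own statement) =====
-- stated objective: faster
-- what changed: Replaces A's while-loop with in-place del (each deletion shifts the tail, O(n^2) worst case) by a single left-to-right pass that appends each element >= the running maximum to a fresh list; B does not mutate its argument (A does), equivalence is about the return value.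
import Mathlib
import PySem

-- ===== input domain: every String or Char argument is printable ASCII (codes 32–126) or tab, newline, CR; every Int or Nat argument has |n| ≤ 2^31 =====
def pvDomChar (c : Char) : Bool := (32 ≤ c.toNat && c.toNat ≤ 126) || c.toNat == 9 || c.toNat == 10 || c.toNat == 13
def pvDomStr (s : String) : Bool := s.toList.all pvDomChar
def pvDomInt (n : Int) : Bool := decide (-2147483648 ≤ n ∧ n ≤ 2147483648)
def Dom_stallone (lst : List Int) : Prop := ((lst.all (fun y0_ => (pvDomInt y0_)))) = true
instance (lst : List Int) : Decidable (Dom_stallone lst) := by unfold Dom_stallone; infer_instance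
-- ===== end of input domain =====

-- B replaces A's while-loop with in-place deletion by one pass appending elements >= the running max;
-- A mutates its argument, B does not: the equivalence proved is about the RETURN value only.

-- ===== PORT A =====
-- A's while loop: index i and the (mutated) list are the state; len(lst)-i decreases each step.
def stalloneLoop (i : Nat) (el : Int) (lst : List Int) : List Int :=
  if h : i < lst.length then
    if el ≤ lst[i] then stalloneLoop (i + 1) lst[i] lst
    else stalloneLoop i el (lst.eraseIdx i)
  else lst
termination_by lst.length - i
decreasing_by
  · omega
  · have := lst.length_eraseIdx_of_lt h; omega

def stallone (lst : List Int) : List Int :=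
  -- el = lst[0]; on the empty list Python raises IndexError (excluded by Pre_), headD's default is never used under Pre_
  stalloneLoop 0 (lst.headD 0) lst

-- ===== PORT B =====
def stalloneAltGo (mx : Option Int) : List Int → List Int
  | [] => []
  | x :: xs =>
    match mx with
    | none => x :: stalloneAltGo (some x) xs
    | some m => if m ≤ x then x :: stalloneAltGo (some x) xs else stalloneAltGo (some m) xs

def stallone_alt (lst : List Int) : List Int := stalloneAltGo none lst

-- ===== PRECONDITION & SPEC =====
-- Pre_ excludes only the empty list, on which A raises IndexError at 'lst[0]'.
def Pre_stallone (lst : List Int) : Prop := lst ≠ []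
instance (lst : List Int) : Decidable (Pre_stallone lst) := by unfold Pre_stallone; infer_instance
def pvWitness_stallone : List Int := [3, 1, 4, 4, 2, 5]

def Spec_stallone (lst : List Int) (out : List Int) : Prop := out = stallone_alt lst
instance (lst : List Int) (out : List Int) : Decidable (Spec_stallone lst out) := by unfold Spec_stallone; infer_instance

-- ===== CLAIM (what is proved, stated in full; the proofs are below) =====
def Claim_equal_stallone : Prop := ∀ (lst : List Int), Dom_stallone lst → Pre_stallone lst → Spec_stallone lst (stallone lst)

-- ===== LEMMAS AND PROOFS =====

-- B's pass once the max is initialised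
lemma altGo_some (m x : Int) (xs : List Int) :
    stalloneAltGo (some m) (x :: xs) =
      if m ≤ x then x :: stalloneAltGo (some x) xs else stalloneAltGo (some m) xs := rfl

-- A's loop keeps the first i elements untouched and runs B's pass on the rest
lemma stalloneLoop_eq (i : Nat) (el : Int) (lst : List Int) :
    stalloneLoop i el lst = lst.take i ++ stalloneAltGo (some el) (lst.drop i) := by
  induction hn : lst.length - i using Nat.strong_induction_on generalizing i el lst with
  | _ n ih =>
    rw [stalloneLoop]
    split
    · next h =>
      have hdrop : lst.drop i = lst[i] :: lst.drop (i + 1) :=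
        List.drop_eq_getElem_cons h
      split
      · next hle =>
        rw [ih (lst.length - (i+1)) (by omega) _ _ _ rfl]
        rw [hdrop, altGo_some, if_pos hle]
        have : List.take (i + 1) lst = List.take i lst ++ [lst[i]] := by
          rw [List.take_add_one, List.getElem?_eq_getElem h]; rfl
        rw [this, List.append_assoc]; rfl
      · next hgt =>
        have herase : lst.eraseIdx i = lst.take i ++ lst.drop (i + 1) :=
          List.eraseIdx_eq_take_drop_succ lst i
        have hlen : (lst.eraseIdx i).length = lst.length - 1 :=
          List.length_eraseIdx_of_lt h
        rw [ih ((lst.eraseIdx i).length - i) (by omega) _ _ _ rfl]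
        rw [hdrop, altGo_some, if_neg hgt, herase]
        have hti : (lst.take i).length = i := by
          simp [List.length_take]; omega
        rw [List.take_append_of_le_length (by omega), List.take_take,
            List.drop_append_of_le_length (by omega)]
        simp
    · next h =>
      rw [List.drop_eq_nil_of_le (by omega), List.take_of_length_le (by omega)]
      simp [stalloneAltGo]

-- ===== VERDICT (by name: the statement is the Claim_ definition above) =====
theorem stallone_spec : Claim_equal_stallone := by
  intro lst _ hpre
  unfold Spec_stallone stallone stallone_alt
  rw [stalloneLoop_eq]
  cases lst with
  | nil => exact absurd rfl hpre
  | cons x xs =>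
    simp [stalloneAltGo, altGo_some]
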